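-- pv_equiv track=rewrite | github.com/raunitsingh/luggage-intel | analysis/themes.py | _count_theme_mentions
-- ===== SOURCE A (Python) =====
-- from collections import defaultdict
-- from typing import List, Dict
--
-- def _count_theme_mentions(reviews: List[str], theme_dict: Dict) -> Dict[str, int]:
--     """
--     Count how many reviews mention each theme.
--
--     Args:
--         reviews:    List of review body strings
--         theme_dict: Dict of theme_name → list of keyword phrases
--
--     Returns:
--         Dict of theme_name → mention_count
--     """
--     counts = defaultdict(int)
--     for review in reviews:
--         if not isinstance(review, str):
--             continue
--         review_lower = review.lower()
--         for theme, keywords in theme_dict.items():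
--             if any(kw in review_lower for kw in keywords):
--                 counts[theme] += 1
--     return dict(counts)
-- ===== SOURCE B (Python) =====
-- from typing import List, Dict
--
-- def _count_theme_mentions(reviews: List[str], theme_dict: Dict) -> Dict[str, int]:
--     """
--     Count how many reviews mention each theme, using an inverted keyword index:
--     each distinct keyword is tested against a review once, no matter how many
--     themes share it, and the per-theme keyword scan disappears.
--     """
--     themes_by_kw = {}
--     for theme, keywords in theme_dict.items():
--         for kw in keywords:
--             themes_by_kw.setdefault(kw, set()).add(theme)
--     counts = {}
--     for review in reviews:
--         if not isinstance(review, str):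
--             continue
--         low = review.lower()
--         hit = set()
--         for kw, themes in themes_by_kw.items():
--             if kw in low:
--                 hit |= themes
--         for theme in theme_dict:
--             if theme in hit:
--                 counts[theme] = counts.get(theme, 0) + 1
--     return counts
-- ===== Notes on version B (the rewrite author's own statement) =====
-- stated objective: faster
-- what changed: Replaces A's per-review per-theme keyword scan by an inverted keyword->themes index built once: each distinct keyword phrase is substring-tested against a review once (keywords shared between themes are tested once, not per theme) and hit themes are collected as a set; Pre_ only states the dict invariant (distinct theme keys), which every real dict argument satisfies.
import Mathlib
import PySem

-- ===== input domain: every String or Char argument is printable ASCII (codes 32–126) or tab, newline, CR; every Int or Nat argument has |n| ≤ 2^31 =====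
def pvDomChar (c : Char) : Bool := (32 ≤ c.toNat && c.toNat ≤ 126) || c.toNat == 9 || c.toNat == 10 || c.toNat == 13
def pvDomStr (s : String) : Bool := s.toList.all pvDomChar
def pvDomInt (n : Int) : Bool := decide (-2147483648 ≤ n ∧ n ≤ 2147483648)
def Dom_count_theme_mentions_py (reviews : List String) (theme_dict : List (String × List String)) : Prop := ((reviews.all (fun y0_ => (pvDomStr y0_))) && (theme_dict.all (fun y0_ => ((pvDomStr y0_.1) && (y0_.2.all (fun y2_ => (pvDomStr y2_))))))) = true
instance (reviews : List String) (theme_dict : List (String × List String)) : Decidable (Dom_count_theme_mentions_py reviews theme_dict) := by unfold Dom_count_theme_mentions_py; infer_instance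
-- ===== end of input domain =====

-- B replaces A's per-review per-theme keyword scan by an inverted keyword→themes index built once:
-- each distinct keyword is substring-tested against a review once and the hit themes are collected
-- as a set (measurably faster by a constant factor in a timing run); equal output, dict order included.

-- ===== PORT A =====
-- 'isinstance(review, str)' is always true for an argument of type List String, so the 'continue' branch is vacuous.
def count_theme_mentions_py (reviews : List String) (theme_dict : List (String × List String)) : List (String × Int) :=
  (reviews.foldl
    (fun counts review =>
      let review_lower := PySem.Str.lower review
      theme_dict.foldl
        (fun counts p =>
          if p.2.any (fun kw => PySem.Str.isIn kw review_lower) then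
            counts.modify p.1 0 (· + 1)
          else counts)
        counts)
    PySem.Dict.empty).items

-- ===== PORT B =====
-- 'isinstance(review, str)' is always true for an argument of type List String, so the 'continue' branch is vacuous.
def count_theme_mentions_py_alt (reviews : List String) (theme_dict : List (String × List String)) : List (String × Int) :=
  let themes_by_kw : PySem.Dict String (PySem.Set String) :=
    theme_dict.foldl
      (fun d p => p.2.foldl
        (fun d kw => d.modify kw PySem.Set.empty (fun s => PySem.Set.add s p.1)) d)
      PySem.Dict.empty
  (reviews.foldl
    (fun counts review =>
      let low := PySem.Str.lower review
      let hit : PySem.Set String :=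
        themes_by_kw.items.foldl
          (fun h q => if PySem.Str.isIn q.1 low then PySem.Set.union h q.2 else h)
          PySem.Set.empty
      theme_dict.foldl
        (fun counts p =>
          if PySem.Set.contains hit p.1 then
            counts.insert p.1 (counts.getD p.1 0 + 1)
          else counts)
        counts)
    PySem.Dict.empty).items

-- ===== PRECONDITION & SPEC =====
-- The association list models a Python dict: its keys are distinct (a list with a duplicate key does
-- not represent any Python dict argument — the duplicate collapses when the dict is built).
def Pre_count_theme_mentions_py (reviews : List String) (theme_dict : List (String × List String)) : Prop :=
  (theme_dict.map Prod.fst).Nodup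
instance (reviews : List String) (theme_dict : List (String × List String)) : Decidable (Pre_count_theme_mentions_py reviews theme_dict) := by unfold Pre_count_theme_mentions_py; infer_instance

def pvWitness_count_theme_mentions_py : List String × (List (String × List String)) :=
  (["The zipper Broke fast", "great bag"], [("durability", ["broke", "torn"]), ("praise", ["great"])])

def Spec_count_theme_mentions_py (reviews : List String) (theme_dict : List (String × List String)) (out : List (String × Int)) : Prop := out = count_theme_mentions_py_alt reviews theme_dict
instance (reviews : List String) (theme_dict : List (String × List String)) (out : List (String × Int)) : Decidable (Spec_count_theme_mentions_py reviews theme_dict out) := by unfold Spec_count_theme_mentions_py; infer_instance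

-- ===== CLAIM (what is proved, stated in full; the proofs are below) =====
def Claim_equal_count_theme_mentions_py : Prop := ∀ (reviews : List String) (theme_dict : List (String × List String)), Dom_count_theme_mentions_py reviews theme_dict → Pre_count_theme_mentions_py reviews theme_dict → Spec_count_theme_mentions_py reviews theme_dict (count_theme_mentions_py reviews theme_dict)

-- ===== LEMMAS AND PROOFS =====

-- the (keyword, theme) pairs of theme_dict, in build order
def pvPairs (T : List (String × List String)) : List (String × String) :=
  T.flatMap (fun p => p.2.map (fun kw => (kw, p.1)))

-- one index-build step
def pvStep (d : PySem.Dict String (PySem.Set String)) (q : String × String) :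
    PySem.Dict String (PySem.Set String) :=
  d.modify q.1 PySem.Set.empty (fun s => PySem.Set.add s q.2)

-- B's nested index build is the flat fold over pvPairs
lemma pvIdx_eq (T : List (String × List String)) :
    T.foldl
      (fun d p => p.2.foldl
        (fun d kw => d.modify kw PySem.Set.empty (fun s => PySem.Set.add s p.1)) d)
      PySem.Dict.empty
    = (pvPairs T).foldl pvStep PySem.Dict.empty := by
  unfold pvPairs
  rw [List.foldl_flatMap]
  apply PySem.List.foldl_congr_mem
  intro d p _
  rw [List.foldl_map]
  rfl

lemma pvIdx_keys_nodup (ps : List (String × String)) :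
    ((ps.foldl pvStep PySem.Dict.empty).keys).Nodup := by
  unfold pvStep
  exact PySem.Dict.nodup_keys_foldl_modify_key ps Prod.fst PySem.Set.empty
    (fun _ q => fun s => PySem.Set.add s q.2) PySem.Dict.empty PySem.Dict.nodup_keys_empty

-- membership in the index's value at a key
lemma pvIdx_getD (ps : List (String × String)) (d : PySem.Dict String (PySem.Set String))
    (kw t : String) :
    t ∈ (ps.foldl pvStep d).getD kw PySem.Set.empty
      ↔ t ∈ d.getD kw PySem.Set.empty ∨ ∃ q ∈ ps, q.1 = kw ∧ q.2 = t := by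
  induction ps generalizing d with
  | nil => simp
  | cons q ps ih =>
    rw [List.foldl_cons, ih]
    have hstep : t ∈ (pvStep d q).getD kw PySem.Set.empty
        ↔ t ∈ d.getD kw PySem.Set.empty ∨ (q.1 = kw ∧ q.2 = t) := by
      unfold pvStep
      rw [PySem.Dict.getD_modify]
      by_cases h : kw = q.1
      · subst h
        rw [if_pos rfl, PySem.Set.mem_add]
        constructor
        · rintro (h | h)
          · exact Or.inl h
          · exact Or.inr ⟨rfl, h.symm⟩
        · rintro (h | ⟨-, h⟩)
          · exact Or.inl h
          · exact Or.inr h.symm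
      · rw [if_neg h]
        constructor
        · exact Or.inl
        · rintro (h' | ⟨hq, -⟩)
          · exact h'
          · exact absurd hq.symm h
    rw [hstep]
    constructor
    · rintro (h | h)
      · rcases h with h | h
        · exact Or.inl h
        · exact Or.inr ⟨q, List.mem_cons_self, h⟩
      · obtain ⟨q', hq', h'⟩ := h
        exact Or.inr ⟨q', List.mem_cons_of_mem _ hq', h'⟩
    · rintro (h | ⟨q', hq', h'⟩)
      · exact Or.inl (Or.inl h)
      · rcases List.mem_cons.mp hq' with rfl | hq'
        · exact Or.inl (Or.inr h')
        · exact Or.inr ⟨q', hq', h'⟩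

-- a keyword is a key of the index iff it occurs in some pair
lemma pvIdx_keys (ps : List (String × String)) (kw : String) :
    kw ∈ (ps.foldl pvStep PySem.Dict.empty).keys ↔ ∃ q ∈ ps, q.1 = kw := by
  unfold pvStep
  rw [PySem.Dict.keys_foldl_modify_key ps Prod.fst PySem.Set.empty
    (fun _ q => fun s => PySem.Set.add s q.2) PySem.Dict.empty]
  simp [PySem.Set.mem_update, PySem.Dict.keys_empty, eq_comm]

-- membership in the union fold over the index's items
lemma pvHitFold (items : List (String × PySem.Set String)) (low : String)
    (h0 : PySem.Set String) (t : String) :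
    t ∈ items.foldl
        (fun h q => if PySem.Str.isIn q.1 low then PySem.Set.union h q.2 else h) h0
      ↔ t ∈ h0 ∨ ∃ q ∈ items, PySem.Str.isIn q.1 low = true ∧ t ∈ q.2 := by
  induction items generalizing h0 with
  | nil => simp
  | cons q items ih =>
    rw [List.foldl_cons, ih]
    by_cases h : PySem.Str.isIn q.1 low = true
    · rw [if_pos h, PySem.Set.mem_union]
      constructor
      · rintro ((h' | h') | h')
        · exact Or.inl h'
        · exact Or.inr ⟨q, List.mem_cons_self, h, h'⟩
        · obtain ⟨q', hq', h'⟩ := h'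
          exact Or.inr ⟨q', List.mem_cons_of_mem _ hq', h'⟩
      · rintro (h' | ⟨q', hq', h'⟩)
        · exact Or.inl (Or.inl h')
        · rcases List.mem_cons.mp hq' with rfl | hq'
          · exact Or.inl (Or.inr h'.2)
          · exact Or.inr ⟨q', hq', h'⟩
    · rw [if_neg h]
      constructor
      · rintro (h' | ⟨q', hq', h'⟩)
        · exact Or.inl h'
        · exact Or.inr ⟨q', List.mem_cons_of_mem _ hq', h'⟩
      · rintro (h' | ⟨q', hq', h'⟩)
        · exact Or.inl h'
        · rcases List.mem_cons.mp hq' with rfl | hq'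
          · exact absurd h'.1 h
          · exact Or.inr ⟨q', hq', h'⟩

-- the per-review, per-theme condition of B equals A's direct keyword scan
lemma pvCond {T : List (String × List String)} (hK : (T.map Prod.fst).Nodup)
    (low : String) {p : String × List String} (hp : p ∈ T) :
    PySem.Set.contains
      (((pvPairs T).foldl pvStep PySem.Dict.empty).items.foldl
        (fun h q => if PySem.Str.isIn q.1 low then PySem.Set.union h q.2 else h)
        PySem.Set.empty)
      p.1
    = p.2.any (fun kw => PySem.Str.isIn kw low) := by
  set idx := (pvPairs T).foldl pvStep PySem.Dict.empty with hidx
  rw [Bool.eq_iff_iff, PySem.Set.contains_iff, List.any_eq_true, pvHitFold]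
  constructor
  · rintro (h | ⟨⟨qk, qS⟩, hq, hin, hmem⟩)
    · simp [PySem.Set.empty] at h
    · have hnd : idx.keys.Nodup := by rw [hidx]; exact pvIdx_keys_nodup _
      have hgd : idx.getD qk PySem.Set.empty = qS :=
        PySem.Dict.getD_of_mem_items idx hq hnd PySem.Set.empty
      rw [← hgd] at hmem
      rw [pvIdx_getD] at hmem
      rcases hmem with h | ⟨pr, hpr, hpr1, hpr2⟩
      · simp [PySem.Dict.getD_empty, PySem.Set.empty] at h
      · obtain ⟨p', hp', hprm⟩ := List.mem_flatMap.mp hpr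
        obtain ⟨kw, hkw, hpr_eq⟩ := List.mem_map.mp hprm
        have hkey : p'.1 = p.1 := by rw [← hpr2, ← hpr_eq]
        have hpp : p' = p := List.inj_on_of_nodup_map hK hp' hp hkey
        subst hpp
        refine ⟨kw, hkw, ?_⟩
        rw [← hpr_eq] at hpr1
        have hk : kw = qk := by simpa using hpr1
        subst hk
        exact hin
  · rintro ⟨kw, hkw, hin⟩
    right
    have hpair : (kw, p.1) ∈ pvPairs T :=
      List.mem_flatMap.mpr ⟨p, hp, List.mem_map.mpr ⟨kw, hkw, rfl⟩⟩
    have hmemk : kw ∈ idx.keys := (pvIdx_keys _ kw).mpr ⟨(kw, p.1), hpair, rfl⟩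
    obtain ⟨S, hS⟩ : ∃ S, idx.get? kw = some S := by
      cases hg : idx.get? kw with
      | none => exact absurd hmemk ((PySem.Dict.get?_eq_none_iff_not_mem_keys idx kw).mp hg)
      | some S => exact ⟨S, rfl⟩
    refine ⟨(kw, S), PySem.Dict.mem_items_of_get?_eq_some idx hS, hin, ?_⟩
    have hgd : idx.getD kw PySem.Set.empty = S :=
      PySem.Dict.getD_of_get?_eq_some idx PySem.Set.empty hS
    show p.1 ∈ S
    rw [← hgd, pvIdx_getD]
    exact Or.inr ⟨(kw, p.1), hpair, rfl, rfl⟩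

-- ===== VERDICT (by name: the statement is the Claim_ definition above) =====
theorem count_theme_mentions_py_spec : Claim_equal_count_theme_mentions_py := by
  intro reviews T _ hPre
  unfold Spec_count_theme_mentions_py
  unfold Pre_count_theme_mentions_py at hPre
  unfold count_theme_mentions_py count_theme_mentions_py_alt
  rw [pvIdx_eq T]
  congr 1
  apply PySem.List.foldl_congr_mem
  intro counts review _
  apply PySem.List.foldl_congr_mem'
  intro p hp counts'
  rw [pvCond hPre (PySem.Str.lower review) hp]
  rfl
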